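-- pv_equiv track=rewrite | github.com/sobecc/Applied-Data-Science-Bootcamp | ads00_preparation/02_preparation_programming/business_intelligence.py | minimum_profitable_volume
-- ===== SOURCE A (Python) =====
-- def minimum_profitable_volume(sell_price, fixed_cost, cost_per_unit):
--     """
--     For this exercise, you will need to implement a function that
--     computes the minimum number of units that need to be manufactured by a factory
--     for their process to be profitable.
--
--     We assume that every unit manufactured is sold at the sell_price.
--     You will need to take into account the fixed_cost, which is a constant cost
--     associated with manufactoring as well as the cost_per_unit that we have to pay for
--     each unit manufactured.
--
--     Your goal is to find how many units need to be built and sold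
--     in order for the total cost to be entirely covered by sales.
--
--     E.g., minimum_profitable_volume(1020, 1000, 20) is 1
--     E.g., minimum_profitable_volume(1019, 1000, 20) is 2
--     E.g., minimum_profitable_volume(600, 1000, 20) is 2
--     E.g., minimum_profitable_volume(30, 1000, 20) is 100
--     E.g., minimum_profitable_volume(21, 1000, 20) is 1000
--
--     Note: It isn't sustainable for the factory to sell a unit in a lower price than
--     its manufacturing cost as it wouldn't make any profit. If that is the case and
--     you cannot be profitable, return None.
--
--     :param sell_price: price each unit is sold at
--     :return: number of units that need to be made and sold
--     :rtype: float | int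
--     """
--     count = 0
--     income = - fixed_cost
--     make_sell_diff = sell_price - cost_per_unit
--     while income < 0:
--         count += 1
--         income = income + make_sell_diff
--     return count
-- ===== SOURCE B (Python) =====
-- def minimum_profitable_volume(sell_price, fixed_cost, cost_per_unit):
--     # Closed form: with positive margin, the loop runs ceil(fixed_cost/margin) times
--     # (0 times when fixed_cost <= 0).
--     if fixed_cost <= 0:
--         return 0
--     margin = sell_price - cost_per_unit
--     return -(-fixed_cost // margin)
-- ===== Notes on version B (the rewrite author's own statement) =====
-- stated objective: faster
-- what changed: Replaced the unit-by-unit accumulation loop with the closed-form ceiling division ceil(fixed_cost/margin); Pre_ excludes margin <= 0 with fixed_cost > 0, where A loops forever.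
import Mathlib
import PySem

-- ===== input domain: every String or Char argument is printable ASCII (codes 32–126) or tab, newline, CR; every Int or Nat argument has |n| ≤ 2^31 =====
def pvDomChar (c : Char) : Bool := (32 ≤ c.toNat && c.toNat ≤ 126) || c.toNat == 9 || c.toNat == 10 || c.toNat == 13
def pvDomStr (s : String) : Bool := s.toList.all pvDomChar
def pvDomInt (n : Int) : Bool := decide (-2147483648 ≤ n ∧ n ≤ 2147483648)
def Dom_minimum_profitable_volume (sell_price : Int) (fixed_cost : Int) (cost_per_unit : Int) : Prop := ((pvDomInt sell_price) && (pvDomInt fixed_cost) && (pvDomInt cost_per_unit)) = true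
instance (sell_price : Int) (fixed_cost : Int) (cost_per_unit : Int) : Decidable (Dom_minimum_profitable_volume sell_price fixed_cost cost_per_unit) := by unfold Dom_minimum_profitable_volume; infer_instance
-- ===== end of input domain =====

-- B replaces A's unit-by-unit loop with closed-form ceiling division; Pre_ excludes the inputs on which A's while-loop never terminates.
-- ===== PORT A =====
-- the while-loop of A; the margin ≤ 0 branch only makes the recursion total (A diverges there; outside Pre_)
def pvLoopA (margin : Int) (count : Int) (income : Int) : Int :=
  if income < 0 then
    if margin ≤ 0 then count
    else pvLoopA margin (count + 1) (income + margin)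
  else count
termination_by (-income).toNat
decreasing_by omega

def minimum_profitable_volume (sell_price : Int) (fixed_cost : Int) (cost_per_unit : Int) : Int :=
  pvLoopA (sell_price - cost_per_unit) 0 (-fixed_cost)

-- ===== PORT B =====
def minimum_profitable_volume_alt (sell_price : Int) (fixed_cost : Int) (cost_per_unit : Int) : Int :=
  if fixed_cost ≤ 0 then 0
  else -(PySem.Int.floordiv (-fixed_cost) (sell_price - cost_per_unit))

-- ===== PRECONDITION & SPEC =====
-- Pre_ excludes exactly the inputs (fixed_cost > 0 and margin ≤ 0) on which A's while-loop never terminates.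
def Pre_minimum_profitable_volume (sell_price : Int) (fixed_cost : Int) (cost_per_unit : Int) : Prop :=
  fixed_cost ≤ 0 ∨ 0 < sell_price - cost_per_unit
instance (sell_price : Int) (fixed_cost : Int) (cost_per_unit : Int) : Decidable (Pre_minimum_profitable_volume sell_price fixed_cost cost_per_unit) := by unfold Pre_minimum_profitable_volume; infer_instance
def pvWitness_minimum_profitable_volume : Int × Int × Int := (30, 1000, 20)
def Spec_minimum_profitable_volume (sell_price : Int) (fixed_cost : Int) (cost_per_unit : Int) (out : Int) : Prop := out = minimum_profitable_volume_alt sell_price fixed_cost cost_per_unit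
instance (sell_price : Int) (fixed_cost : Int) (cost_per_unit : Int) (out : Int) : Decidable (Spec_minimum_profitable_volume sell_price fixed_cost cost_per_unit out) := by unfold Spec_minimum_profitable_volume; infer_instance

-- ===== CLAIM (what is proved, stated in full; the proofs are below) =====
def Claim_equal_minimum_profitable_volume : Prop := ∀ (sell_price : Int) (fixed_cost : Int) (cost_per_unit : Int), Dom_minimum_profitable_volume sell_price fixed_cost cost_per_unit → Pre_minimum_profitable_volume sell_price fixed_cost cost_per_unit → Spec_minimum_profitable_volume sell_price fixed_cost cost_per_unit (minimum_profitable_volume sell_price fixed_cost cost_per_unit)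

-- ===== LEMMAS AND PROOFS =====
theorem pv_ediv_neg (a b : Int) (ha : a < 0) (hb : 0 < b) : a / b < 0 := by
  by_contra h
  push Not at h
  have h1 := Int.mul_ediv_add_emod a b
  have h2 := Int.emod_nonneg a (by omega : b ≠ 0)
  have h3 : 0 ≤ b * (a / b) := mul_nonneg hb.le h
  omega
theorem pvLoopA_closed (margin : Int) (count : Int) (income : Int) (hm : 0 < margin) :
    pvLoopA margin count income = count + max 0 (-(PySem.Int.floordiv income margin)) := by
  induction count, income using pvLoopA.induct margin with
  | case1 count income hneg hle => omega
  | case2 count income hneg hle ih =>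
    rw [pvLoopA]
    simp only [hneg, if_true, if_neg hle]
    rw [ih]
    rw [PySem.Int.floordiv_eq_ediv_of_pos hm, PySem.Int.floordiv_eq_ediv_of_pos hm] at *
    have h1 : (income + margin) / margin = income / margin + 1 := by
      have := Int.add_mul_ediv_right income 1 (by omega : margin ≠ 0)
      simpa using this
    have h2 : income / margin < 0 := pv_ediv_neg _ _ hneg hm
    omega
  | case3 count income hneg =>
    rw [pvLoopA]
    simp only [if_neg hneg]
    have : 0 ≤ income / margin := Int.ediv_nonneg (by omega) (by omega)
    rw [PySem.Int.floordiv_eq_ediv_of_pos hm]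
    omega

-- ===== VERDICT (by name: the statement is the Claim_ definition above) =====
theorem minimum_profitable_volume_spec : Claim_equal_minimum_profitable_volume := by
  intro s f c _ hpre
  unfold Spec_minimum_profitable_volume minimum_profitable_volume minimum_profitable_volume_alt
  by_cases hf : f ≤ 0
  · rw [pvLoopA]
    simp [hf]
  · have hm : 0 < s - c := by
      rcases hpre with h | h
      · omega
      · exact h
    simp only [if_neg hf]
    rw [pvLoopA_closed _ _ _ hm]
    rw [PySem.Int.floordiv_eq_ediv_of_pos hm]
    have h2 : (-f) / (s - c) < 0 := pv_ediv_neg _ _ (by omega) hm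
    omega
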